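-- pv_equiv track=rewrite | github.com/alexsfking/python_exercises | hackerrank/one_week_preparation_kit/other/sherlock_valid_string.py | calculate_repeating_values
-- ===== SOURCE A (Python) =====
-- def calculate_repeating_values(character_occurrence_dict:dict)->dict():
--     value_occurrence_dict=dict()
--     for k,v in character_occurrence_dict.items():
--         if(v not in value_occurrence_dict):
--             value_occurrence_dict[v]=1
--         else:
--             value_occurrence_dict[v]+=1
--     return value_occurrence_dict
-- ===== SOURCE B (Python) =====
-- def calculate_repeating_values(character_occurrence_dict: dict) -> dict:
--     values = list(character_occurrence_dict.values())
--     return {v: values.count(v) for i, v in enumerate(values) if v not in values[:i]}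
-- ===== Notes on version B (the rewrite author's own statement) =====
-- stated objective: alternative
-- what changed: Replaces the incremental counter-dict loop (membership test, insert-1 or increment per item) with a single dict comprehension that keeps each value's first occurrence (v not in values[:i]) and computes its multiplicity directly with values.count(v).
import Mathlib
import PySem

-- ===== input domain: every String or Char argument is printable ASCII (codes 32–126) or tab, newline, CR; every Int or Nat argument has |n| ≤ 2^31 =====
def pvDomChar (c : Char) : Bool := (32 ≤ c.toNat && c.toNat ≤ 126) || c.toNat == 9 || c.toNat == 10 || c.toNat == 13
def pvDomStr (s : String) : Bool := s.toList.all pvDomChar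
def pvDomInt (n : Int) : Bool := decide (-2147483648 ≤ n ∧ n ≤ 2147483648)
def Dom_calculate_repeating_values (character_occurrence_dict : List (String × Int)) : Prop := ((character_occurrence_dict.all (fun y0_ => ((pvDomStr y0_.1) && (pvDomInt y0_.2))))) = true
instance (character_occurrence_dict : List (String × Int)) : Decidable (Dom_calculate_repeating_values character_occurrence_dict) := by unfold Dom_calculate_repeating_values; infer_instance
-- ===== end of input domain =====

-- B replaces the incremental counter-dict loop with a first-occurrence comprehension plus values.count; alternative decomposition, same return value.


-- ===== PORT A =====
-- for k,v in items: if v not in d: d[v]=1 else: d[v]+=1 ; return d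
def calculate_repeating_values (character_occurrence_dict : List (String × Int)) : List (Int × Int) :=
  (character_occurrence_dict.foldl
    (fun d p =>
      if PySem.Dict.contains d p.2 then
        PySem.Dict.insert d p.2 (PySem.Dict.getD d p.2 0 + 1)   -- d[v] += 1 (v present, so getD reads d[v])
      else
        PySem.Dict.insert d p.2 1)
    PySem.Dict.empty).items

-- ===== PORT B =====
-- values = list(d.values()); {v: values.count(v) for i,v in enumerate(values) if v not in values[:i]}
def calculate_repeating_values_alt (character_occurrence_dict : List (String × Int)) : List (Int × Int) :=
  let values := character_occurrence_dict.map Prod.snd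
  ((PySem.List.enumerate values).filter
      (fun p => !((PySem.List.slice values none (some p.1)).contains p.2))).map
    (fun p => (p.2, (values.count p.2 : Int)))

-- ===== PRECONDITION & SPEC =====
def Spec_calculate_repeating_values (character_occurrence_dict : List (String × Int)) (out : List (Int × Int)) : Prop := out = calculate_repeating_values_alt character_occurrence_dict
instance (character_occurrence_dict : List (String × Int)) (out : List (Int × Int)) : Decidable (Spec_calculate_repeating_values character_occurrence_dict out) := by unfold Spec_calculate_repeating_values; infer_instance

-- ===== CLAIM (what is proved, stated in full; the proofs are below) =====
def Claim_equal_calculate_repeating_values : Prop := ∀ (character_occurrence_dict : List (String × Int)), Dom_calculate_repeating_values character_occurrence_dict → Spec_calculate_repeating_values character_occurrence_dict (calculate_repeating_values character_occurrence_dict)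

-- ===== LEMMAS AND PROOFS =====

-- A's branchy step is the counter step.
lemma step_eq :
    (fun (d : PySem.Dict Int Int) (p : String × Int) =>
      if PySem.Dict.contains d p.2 then
        PySem.Dict.insert d p.2 (PySem.Dict.getD d p.2 0 + 1)
      else
        PySem.Dict.insert d p.2 1)
    = (fun d p => PySem.Dict.insert d p.2 (PySem.Dict.getD d p.2 0 + 1)) := by
  funext d p
  split_ifs with h
  · rfl
  · rw [PySem.Dict.getD_of_not_contains]
    · rfl
    · simpa using h

-- first-occurrence filter over an enumerate, generalized by an already-seen prefix
lemma firsts_eq (xs pre : List Int) :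
    ((PySem.List.enumerate xs (pre.length : Int)).filter
        (fun p => !((PySem.List.slice (pre ++ xs) none (some p.1)).contains p.2))).map Prod.snd
    = (PySem.Set.ofList xs).filter (fun y => !(pre.contains y)) := by
  induction xs generalizing pre with
  | nil => simp [PySem.List.enumerate_nil, PySem.Set.ofList_nil]
  | cons x rest ih =>
    have hslice : PySem.List.slice (pre ++ x :: rest) none (some (pre.length : Int)) = pre := by
      rw [PySem.List.slice_to_natCast]
      simp
    have ih' := ih (pre ++ [x])
    simp only [List.length_append, List.length_cons, List.length_nil, Nat.cast_add,
      Nat.cast_one, List.append_assoc, List.cons_append, List.nil_append] at ih'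
    have hrest :
        ((PySem.List.enumerate rest ((pre.length : Int) + 1)).filter
            (fun p => !((PySem.List.slice (pre ++ x :: rest) none (some p.1)).contains p.2))).map Prod.snd
        = (PySem.Set.ofList rest).filter (fun y => !((pre ++ [x]).contains y)) := ih'
    rw [PySem.List.enumerate_cons, List.filter_cons, hslice]
    have hcomm : ∀ (s : List Int),
        (s.filter (fun y => !(decide (y = x)))).filter (fun y => !(pre.contains y))
        = s.filter (fun y => !((pre ++ [x]).contains y)) := by
      intro s
      rw [List.filter_filter]
      apply List.filter_congr
      intro y _
      simp only [List.contains_append, List.contains_cons, List.contains_nil]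
      cases hyx : (decide (y = x)) <;> cases hyp : (pre.contains y) <;> simp_all
    by_cases hx : pre.contains x
    · simp only [hx, Bool.not_true, Bool.false_eq_true, if_false]
      rw [hrest, PySem.Set.ofList_cons, List.filter_cons]
      simp only [hx, Bool.not_true, Bool.false_eq_true, if_false]
      rw [PySem.Set.discard, ← hcomm]
      rfl
    · simp only [hx, Bool.not_false, if_true, List.map_cons]
      rw [hrest, PySem.Set.ofList_cons, List.filter_cons]
      simp only [hx, Bool.not_false, if_true]
      rw [PySem.Set.discard, ← hcomm]
      rfl

lemma alt_eq_counter_items (cod : List (String × Int)) :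
    calculate_repeating_values_alt cod = (PySem.Dict.counter (cod.map Prod.snd)).items := by
  unfold calculate_repeating_values_alt
  set values := cod.map Prod.snd with hv
  have h0 := firsts_eq values []
  simp only [List.length_nil, Nat.cast_zero, List.nil_append, List.contains_nil,
    Bool.not_false, List.filter_true] at h0
  rw [PySem.Dict.items_counter]
  have : ((PySem.List.enumerate values 0).filter
        (fun p => !((PySem.List.slice values none (some p.1)).contains p.2))).map
      (fun p => (p.2, (values.count p.2 : Int)))
      = (((PySem.List.enumerate values 0).filter
        (fun p => !((PySem.List.slice values none (some p.1)).contains p.2))).map Prod.snd).map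
      (fun v => (v, (values.count v : Int))) := by
    rw [List.map_map]; rfl
  rw [this, h0]

lemma a_eq_counter_items (cod : List (String × Int)) :
    calculate_repeating_values cod = (PySem.Dict.counter (cod.map Prod.snd)).items := by
  unfold calculate_repeating_values
  rw [step_eq, ← PySem.Dict.foldl_insert_getD_add_one_eq_counter, List.foldl_map]

-- ===== VERDICT (by name: the statement is the Claim_ definition above) =====
theorem calculate_repeating_values_spec : Claim_equal_calculate_repeating_values := by
  intro cod _
  unfold Spec_calculate_repeating_values
  rw [a_eq_counter_items, alt_eq_counter_items]
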